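-- pv_equiv track=rewrite | github.com/ericgong2005/LosslessModelCompression | CompressionBenchmarkHuffman.py | _rebuild_canonical_tree
-- ===== SOURCE A (Python) =====
-- def _rebuild_canonical_tree(lengths: list) -> dict:
--     """
--     Reconstruct canonical Huffman codes from a list of code lengths.
--
--     This is what a decoder does on startup before it can decode any symbol:
--       1. Sort symbols by code length.
--       2. Assign canonical codes (integer counters, incremented and shifted).
--       3. Build a lookup dict: code → symbol.
--
--     Returns decode_table: dict mapping (code_int, length) → symbol.
--     This is the minimal work a streaming decoder must do.
--     """
--     # Pair (length, symbol), skip absent symbols (length == 0)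
--     syms_by_len = sorted(
--         [(l, s) for s, l in enumerate(lengths) if l > 0]
--     )
--     if not syms_by_len:
--         return {}
--
--     decode_table = {}
--     code         = 0
--     prev_len     = 0
--     for length, sym in syms_by_len:
--         code <<= (length - prev_len)   # shift up when length increases
--         decode_table[(code, length)] = sym
--         code    += 1
--         prev_len = length
--
--     return decode_table
-- ===== SOURCE B (Python) =====
-- def _rebuild_canonical_tree(lengths: list) -> dict:
--     # RFC-1951 style reconstruction: group symbols per length in one pass,
--     # derive each length's first canonical code arithmetically from the
--     # previous length's code count, then enumerate each length class from its
--     # first code -- no sort of the symbol list and no per-symbol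
--     # shift-and-increment counter threaded through the table build.
--     buckets = {}
--     for s, l in enumerate(lengths):
--         if l > 0:
--             buckets.setdefault(l, []).append(s)
--
--     first = []                      # (length, first code of that length)
--     code = 0
--     prev = 0
--     ncodes = 0
--     for l in sorted(buckets):
--         code = (code + ncodes) << (l - prev)
--         first.append((l, code))
--         ncodes = len(buckets[l])
--         prev = l
--
--     return {(c, l): s
--             for l, base in first
--             for c, s in enumerate(buckets[l], base)}
-- ===== Notes on version B (the rewrite author's own statement) =====
-- stated objective: alternative
-- what changed: Replaces A's sort of all (length, symbol) pairs and per-symbol shift-and-increment code counter by the RFC-1951 scheme: group symbols per length in one pass, derive each length's first canonical code arithmetically from the previous length's count, then enumerate each length class from its first code.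
import Mathlib
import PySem

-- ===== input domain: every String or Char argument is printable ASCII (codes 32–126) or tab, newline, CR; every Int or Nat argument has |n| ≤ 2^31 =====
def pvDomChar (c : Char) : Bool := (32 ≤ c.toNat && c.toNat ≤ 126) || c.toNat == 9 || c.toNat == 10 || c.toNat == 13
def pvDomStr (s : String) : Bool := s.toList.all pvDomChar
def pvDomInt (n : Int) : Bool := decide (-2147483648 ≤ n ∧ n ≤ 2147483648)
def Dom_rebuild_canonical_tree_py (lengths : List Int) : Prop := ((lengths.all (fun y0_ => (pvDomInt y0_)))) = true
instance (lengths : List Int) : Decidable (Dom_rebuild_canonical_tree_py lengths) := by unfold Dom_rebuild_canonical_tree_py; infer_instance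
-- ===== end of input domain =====

-- B replaces A's sort + per-symbol shift-and-increment counter by the RFC-1951 scheme
-- (arithmetic first code per length, then each length class enumerated from its first
-- code); objective: alternative algorithm.

-- ===== PORT A =====
-- literal port of _rebuild_canonical_tree: sort the (length, symbol) pairs, then one
-- canonical-code loop; the returned dict is its items list flattened to triples
-- (code, length, symbol).  'code <<= (length - prev_len)': the shift amount is never
-- negative (the pairs are sorted by length), so '.toNat' is exact here.
def rebuild_canonical_tree_py (lengths : List Int) : List (Int × Int × Int) :=
  let syms_by_len : List (Int × Int) :=
    PySem.List.sorted2
      (((PySem.List.enumerate lengths).filter (fun p => decide (0 < p.2))).map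
        (fun p => (p.2, p.1)))
      (fun x => x.1) (fun x => x.2)
  if syms_by_len = [] then []
  else
    let st := syms_by_len.foldl
      (fun (st : PySem.Dict (Int × Int) Int × Int × Int) p =>
        let code := st.2.1 <<< (p.1 - st.2.2).toNat
        (st.1.insert (code, p.1) p.2, code + 1, p.1))
      (PySem.Dict.empty, 0, 0)
    st.1.items.map (fun q => (q.1.1, q.1.2, q.2))

-- ===== PORT B =====
-- literal port of Source B: one grouping pass (setdefault/append = Dict.modify with default
-- []), then the first-code loop over the sorted distinct lengths appending (l, code)
-- pairs, then the dict comprehension over enumerate(bucket, base) as a fold of inserts;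
-- shift amounts are never negative (lengths iterated in increasing order), so '.toNat'
-- is exact.
def rebuild_canonical_tree_py_alt (lengths : List Int) : List (Int × Int × Int) :=
  let buckets : PySem.Dict Int (List Int) :=
    (PySem.List.enumerate lengths).foldl
      (fun d p => if 0 < p.2 then d.modify p.2 [] (· ++ [p.1]) else d)
      PySem.Dict.empty
  let st := (PySem.List.sorted buckets.keys (fun x => x)).foldl
      (fun (st : List (Int × Int) × Int × Int × Int) l =>
        let code := (st.2.1 + st.2.2.1) <<< (l - st.2.2.2).toNat
        (st.1 ++ [(l, code)], code, ((buckets.getD l []).length : Int), l))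
      ([], 0, 0, 0)
  let d := st.1.foldl
      (fun (d : PySem.Dict (Int × Int) Int) lb =>
        (PySem.List.enumerate (buckets.getD lb.1 []) lb.2).foldl
          (fun d cs => d.insert (cs.1, lb.1) cs.2) d)
      PySem.Dict.empty
  d.items.map (fun q => (q.1.1, q.1.2, q.2))

-- ===== PRECONDITION & SPEC =====
def Spec_rebuild_canonical_tree_py (lengths : List Int) (out : List (Int × Int × Int)) : Prop := out = rebuild_canonical_tree_py_alt lengths
instance (lengths : List Int) (out : List (Int × Int × Int)) : Decidable (Spec_rebuild_canonical_tree_py lengths out) := by unfold Spec_rebuild_canonical_tree_py; infer_instance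

-- ===== CLAIM (what is proved, stated in full; the proofs are below) =====
def Claim_equal_rebuild_canonical_tree_py : Prop := ∀ (lengths : List Int), Dom_rebuild_canonical_tree_py lengths → Spec_rebuild_canonical_tree_py lengths (rebuild_canonical_tree_py lengths)

-- ===== LEMMAS AND PROOFS =====

-- the filtered (length, symbol) pair list both programs start from
def pvPairs (lengths : List Int) : List (Int × Int) :=
  ((PySem.List.enumerate lengths).filter (fun p => decide (0 < p.2))).map (fun p => (p.2, p.1))

-- A's per-pair loop step, by name
def pvStepA (st : PySem.Dict (Int × Int) Int × Int × Int) (p : Int × Int) :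
    PySem.Dict (Int × Int) Int × Int × Int :=
  let code := st.2.1 <<< (p.1 - st.2.2).toNat
  (st.1.insert (code, p.1) p.2, code + 1, p.1)

-- B's grouping dict, by name
def pvBuckets (lengths : List Int) : PySem.Dict Int (List Int) :=
  (pvPairs lengths).foldl (fun d p => d.modify p.1 [] (· ++ [p.2])) PySem.Dict.empty

-- B's first-code list, as a structural recursion over the sorted distinct lengths
def pvFirst (buckets : PySem.Dict Int (List Int)) (ks : List Int) (c n p : Int) :
    List (Int × Int) :=
  match ks with
  | [] => []
  | l :: t =>
    let code := (c + n) <<< (l - p).toNat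
    (l, code) :: pvFirst buckets t code ((buckets.getD l []).length : Int) l

-- B's emission step for one (length, first-code) pair, by name
def pvEmit (buckets : PySem.Dict Int (List Int)) (d : PySem.Dict (Int × Int) Int)
    (lb : Int × Int) : PySem.Dict (Int × Int) Int :=
  (PySem.List.enumerate (buckets.getD lb.1 []) lb.2).foldl
    (fun d cs => d.insert (cs.1, lb.1) cs.2) d

theorem pvPairs_pairwise_snd (lengths : List Int) :
    (pvPairs lengths).Pairwise (fun a b => a.2 < b.2) := by
  unfold pvPairs
  rw [List.pairwise_map]
  exact (PySem.List.pairwise_lt_enumerate lengths 0).filter _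

-- Source B's grouping loop, restated as a fold over pvPairs
theorem pvFoldIf (l : List (Int × Int)) (d : PySem.Dict Int (List Int)) :
    l.foldl (fun d p => if 0 < p.2 then d.modify p.2 [] (· ++ [p.1]) else d) d
    = ((l.filter (fun p => decide (0 < p.2))).map (fun p => (p.2, p.1))).foldl
        (fun d p => d.modify p.1 [] (· ++ [p.2])) d := by
  induction l generalizing d with
  | nil => rfl
  | cons x xs ih => by_cases h : 0 < x.2 <;> simp [h, ih]

-- Python's sort of (length, symbol) tuples is the sort under the lexicographic key
theorem pvSorted2_eq_sorted_lex (xs : List (Int × Int)) :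
    PySem.List.sorted2 xs (fun x => x.1) (fun x => x.2)
    = PySem.List.sorted xs (fun x => toLex (x.1, x.2)) := by
  rw [PySem.List.sorted_eq_foldl_insertBy]
  unfold PySem.List.sorted2
  simp only [if_neg (by decide : ¬ (false = true))]
  congr 1
  funext acc x
  congr 1
  funext a b
  by_cases h1 : a.1 < b.1 <;> by_cases h2 : b.1 < a.1 <;> by_cases h3 : a.2 < b.2 <;>
    simp [h1, h2, h3, Prod.Lex.lt_iff] <;> omega

-- distributing a list over the buckets of its (distinct, exhaustive) keys is a permutation
theorem pvFlatMap_filter_perm (ks : List Int) (P : List (Int × Int)) (hnd : ks.Nodup)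
    (hmem : ∀ p ∈ P, p.1 ∈ ks) :
    (ks.flatMap (fun k => P.filter (fun p => p.1 == k))).Perm P := by
  induction ks generalizing P with
  | nil =>
    have : P = [] := List.eq_nil_iff_forall_not_mem.2 (fun p hp => by simpa using hmem p hp)
    simp [this]
  | cons k ks ih =>
    rw [List.flatMap_cons]
    have hk : k ∉ ks := (List.nodup_cons.1 hnd).1
    have hrw : ∀ k' ∈ ks, P.filter (fun p => p.1 == k')
        = (P.filter (fun p => !(p.1 == k))).filter (fun p => p.1 == k') := by
      intro k' hk'
      rw [List.filter_filter]
      apply List.filter_congr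
      intro p _
      by_cases h : p.1 = k'
      · have hne : ¬ k' = k := fun hh => hk (hh ▸ hk')
        have : p.1 ≠ k := fun hh => hne (h ▸ hh)
        simp [h]
        exact hne
      · simp [h]
    have hfl : ks.flatMap (fun k' => P.filter (fun p => p.1 == k'))
        = ks.flatMap (fun k' => (P.filter (fun p => !(p.1 == k))).filter (fun p => p.1 == k')) := by
      rw [List.flatMap, List.flatMap]
      congr 1
      exact List.map_congr_left hrw
    rw [hfl]
    have hperm := ih (P.filter (fun p => !(p.1 == k))) (List.nodup_cons.1 hnd).2
      (by
        intro p hp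
        rw [List.mem_filter] at hp
        have := hmem p hp.1
        rcases List.mem_cons.1 this with h | h
        · exact absurd h (by simpa using hp.2)
        · exact h)
    exact (hperm.append_left _).trans (List.filter_append_perm _ P)

-- the sorted pair list IS the concatenation of the buckets over the sorted distinct lengths
theorem pvSorted2_eq_flatMap (lengths : List Int) (ks : List Int) (hnd : ks.Nodup)
    (hpl : ks.Pairwise (· < ·))
    (hmem : ∀ p ∈ pvPairs lengths, p.1 ∈ ks) :
    PySem.List.sorted2 (pvPairs lengths) (fun x => x.1) (fun x => x.2)
    = ks.flatMap (fun k => (pvPairs lengths).filter (fun p => p.1 == k)) := by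
  rw [pvSorted2_eq_sorted_lex]
  apply PySem.List.sorted_eq_of_perm_of_pairwise_lt _ _ (fun x => (toLex (x.1, x.2) : Lex (Int × Int)))
    (pvFlatMap_filter_perm ks (pvPairs lengths) hnd hmem)
  rw [List.flatMap, List.pairwise_flatten]
  constructor
  · intro l' hl'
    rcases List.mem_map.1 hl' with ⟨k, hk, rfl⟩
    refine ((pvPairs_pairwise_snd lengths).filter _).imp_of_mem ?_
    intro a b ha hb hab
    have ha1 : a.1 = k := by simpa using (List.mem_filter.1 ha).2
    have hb1 : b.1 = k := by simpa using (List.mem_filter.1 hb).2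
    rw [Prod.Lex.lt_iff]
    right
    exact ⟨by simp [ha1, hb1], by simpa using hab⟩
  · rw [List.pairwise_map]
    refine hpl.imp ?_
    intro k₁ k₂ h x hx y hy
    have hx1 : x.1 = k₁ := by simpa using (List.mem_filter.1 hx).2
    have hy1 : y.1 = k₂ := by simpa using (List.mem_filter.1 hy).2
    rw [Prod.Lex.lt_iff]
    left
    simpa [hx1, hy1] using h

-- A's loop over one bucket of length l, starting AT prev = l with code = c:
-- no shift happens; the i-th symbol gets code c + i, i.e. the keys are exactly
-- enumerate(bucket, c)
theorem pvBucketA_aux (l : Int) (b : List (Int × Int)) (hall : ∀ p ∈ b, p.1 = l)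
    (t : PySem.Dict (Int × Int) Int) (c : Int) :
    b.foldl pvStepA (t, c, l)
    = ((PySem.List.enumerate (b.map (·.2)) c).foldl
         (fun d cs => d.insert (cs.1, l) cs.2) t,
       c + b.length, l) := by
  induction b generalizing t c with
  | nil => simp [PySem.List.enumerate_nil]
  | cons p rest ih =>
    have hp : p.1 = l := hall p (List.mem_cons_self)
    simp only [List.foldl_cons, List.map_cons, PySem.List.enumerate_cons]
    rw [show pvStepA (t, c, l) p = (t.insert (c, l) p.2, c + 1, l) by
      simp [pvStepA, hp, Int.shiftLeft_zero]]
    rw [ih (fun q hq => hall q (List.mem_cons_of_mem _ hq)) _ (c + 1)]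
    simp only [List.length_cons, Prod.mk.injEq]
    refine ⟨by simp, by push_cast; ring, by simp⟩

-- A's loop over one nonempty bucket = shift once to the first code, then enumerate
theorem pvBucketA (l : Int) (b : List (Int × Int)) (hb : b ≠ [])
    (hall : ∀ p ∈ b, p.1 = l) (t : PySem.Dict (Int × Int) Int) (c pr : Int) :
    b.foldl pvStepA (t, c, pr)
    = ((PySem.List.enumerate (b.map (·.2)) (c <<< (l - pr).toNat)).foldl
         (fun d cs => d.insert (cs.1, l) cs.2) t,
       c <<< (l - pr).toNat + b.length, l) := by
  match b with
  | [] => exact absurd rfl hb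
  | p :: rest =>
    have hp : p.1 = l := hall p (List.mem_cons_self)
    simp only [List.foldl_cons, List.map_cons, PySem.List.enumerate_cons]
    rw [show pvStepA (t, c, pr) p
        = (t.insert (c <<< (l - pr).toNat, l) p.2, c <<< (l - pr).toNat + 1, l) by
      simp [pvStepA, hp]]
    rw [pvBucketA_aux l rest (fun q hq => hall q (List.mem_cons_of_mem _ hq)) _
        (c <<< (l - pr).toNat + 1)]
    simp only [List.length_cons, Prod.mk.injEq]
    refine ⟨by simp, by push_cast; ring, by simp⟩

-- core: A's fold over the bucket concatenation = B's emission over pvFirst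
theorem pvMain (P : List (Int × Int)) (buckets : PySem.Dict Int (List Int)) (ks : List Int)
    (hne : ∀ k ∈ ks, P.filter (fun p => p.1 == k) ≠ [])
    (hbkt : ∀ k ∈ ks, buckets.getD k [] = (P.filter (fun p => p.1 == k)).map (·.2)) :
    ∀ (t : PySem.Dict (Int × Int) Int) (cB nB pB : Int),
    ((ks.flatMap (fun k => P.filter (fun p => p.1 == k))).foldl pvStepA (t, cB + nB, pB)).1
    = (pvFirst buckets ks cB nB pB).foldl (pvEmit buckets) t := by
  induction ks with
  | nil => intro t cB nB pB; rfl
  | cons k ks ih =>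
    intro t cB nB pB
    have hk : ∀ p ∈ P.filter (fun p => p.1 == k), p.1 = k := by
      intro p hp; simpa using (List.mem_filter.1 hp).2
    rw [List.flatMap_cons, List.foldl_append]
    rw [pvBucketA k _ (hne k List.mem_cons_self) hk t (cB + nB) pB]
    rw [show pvFirst buckets (k :: ks) cB nB pB
        = (k, (cB + nB) <<< (k - pB).toNat)
          :: pvFirst buckets ks ((cB + nB) <<< (k - pB).toNat)
               ((buckets.getD k []).length : Int) k from rfl]
    rw [List.foldl_cons]
    have hemit : pvEmit buckets t (k, (cB + nB) <<< (k - pB).toNat)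
        = (PySem.List.enumerate ((P.filter (fun p => p.1 == k)).map (·.2))
             ((cB + nB) <<< (k - pB).toNat)).foldl
            (fun d cs => d.insert (cs.1, k) cs.2) t := by
      unfold pvEmit
      rw [hbkt k List.mem_cons_self]
    rw [← hemit]
    have hcode : (cB + nB) <<< (k - pB).toNat + ((P.filter (fun p => p.1 == k)).length : Int)
        = (cB + nB) <<< (k - pB).toNat + ((buckets.getD k []).length : Int) := by
      rw [hbkt k List.mem_cons_self, List.length_map]
    rw [hcode]
    exact ih (fun x hx => hne x (List.mem_cons_of_mem _ hx))
      (fun x hx => hbkt x (List.mem_cons_of_mem _ hx)) _ _ _ _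

-- the port's append-accumulator loop builds exactly pvFirst
theorem pvFirst_spec (buckets : PySem.Dict Int (List Int)) (ks : List Int)
    (acc : List (Int × Int)) (c n p : Int) :
    (ks.foldl
       (fun (st : List (Int × Int) × Int × Int × Int) l =>
         let code := (st.2.1 + st.2.2.1) <<< (l - st.2.2.2).toNat
         (st.1 ++ [(l, code)], code, ((buckets.getD l []).length : Int), l)) (acc, c, n, p)).1
    = acc ++ pvFirst buckets ks c n p := by
  induction ks generalizing acc c n p with
  | nil => simp [pvFirst]
  | cons l t ih => simp [pvFirst, ih]

-- ===== VERDICT (by name: the statement is the Claim_ definition above) =====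
theorem rebuild_canonical_tree_py_spec : Claim_equal_rebuild_canonical_tree_py := by
  intro lengths _
  unfold Spec_rebuild_canonical_tree_py rebuild_canonical_tree_py rebuild_canonical_tree_py_alt
  simp only []
  rw [pvFoldIf]
  rw [show (((PySem.List.enumerate lengths).filter (fun p => decide (0 < p.2))).map
      (fun p => (p.2, p.1))) = pvPairs lengths from rfl]
  rw [show (pvPairs lengths).foldl (fun d p => d.modify p.1 [] (· ++ [p.2])) PySem.Dict.empty
      = pvBuckets lengths from rfl]
  have hkeys : ∀ x : Int, x ∈ (pvBuckets lengths).keys ↔ x ∈ (pvPairs lengths).map (·.1) := by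
    intro x
    unfold pvBuckets
    rw [PySem.Dict.keys_foldl_modify_key (pvPairs lengths) (·.1) [] (fun _ p => (· ++ [p.2]))]
    rw [PySem.Set.mem_update]
    simp [PySem.Dict.keys_empty]
  have hknd : (pvBuckets lengths).keys.Nodup :=
    PySem.Dict.nodup_keys_foldl_modify_key (pvPairs lengths) (·.1) [] (fun _ p => (· ++ [p.2]))
      PySem.Dict.empty PySem.Dict.nodup_keys_empty
  have hgetD : ∀ l : Int, (pvBuckets lengths).getD l []
      = ((pvPairs lengths).filter (fun p => p.1 == l)).map (·.2) := by
    intro l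
    unfold pvBuckets
    rw [PySem.Dict.getD_foldl_modify_append (pvPairs lengths) PySem.Dict.empty l]
    simp
  set ks := PySem.List.sorted (pvBuckets lengths).keys (fun x => x) with hks
  have hksnd : ks.Nodup :=
    (PySem.List.sorted_perm (pvBuckets lengths).keys (fun x => x) false).symm.nodup hknd
  have hkspl : ks.Pairwise (· < ·) := by
    refine ((PySem.List.sorted_pairwise (pvBuckets lengths).keys (fun x => x)).and hksnd).imp ?_
    intro a b h
    exact lt_of_le_of_ne h.1 h.2
  have hksmem : ∀ p ∈ pvPairs lengths, p.1 ∈ ks := by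
    intro p hp
    rw [hks, PySem.List.mem_sorted, hkeys]
    exact List.mem_map.2 ⟨p, hp, rfl⟩
  by_cases hP : pvPairs lengths = []
  · have hc : pvBuckets lengths = PySem.Dict.empty := by unfold pvBuckets; rw [hP]; rfl
    have hkeq : ks = [] := by rw [hks, hc]; rfl
    rw [hP, hkeq]
    rfl
  · have hG : PySem.List.sorted2 (pvPairs lengths) (fun x => x.1) (fun x => x.2)
        = ks.flatMap (fun k => (pvPairs lengths).filter (fun p => p.1 == k)) :=
      pvSorted2_eq_flatMap lengths ks hksnd hkspl hksmem
    have hne : PySem.List.sorted2 (pvPairs lengths) (fun x => x.1) (fun x => x.2) ≠ [] := by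
      intro h
      exact hP ((List.Perm.nil_eq
        (h ▸ PySem.List.sorted2_perm (pvPairs lengths) (fun x => x.1) (fun x => x.2) false)).symm)
    rw [if_neg hne, hG]
    have hbne : ∀ k ∈ ks, (pvPairs lengths).filter (fun p => p.1 == k) ≠ [] := by
      intro k hk
      rw [hks, PySem.List.mem_sorted, hkeys] at hk
      rcases List.mem_map.1 hk with ⟨p, hp, rfl⟩
      exact List.ne_nil_of_mem (List.mem_filter.2 ⟨hp, by simp⟩)
    have hmain := pvMain (pvPairs lengths) (pvBuckets lengths) ks
      hbne (fun k _ => hgetD k) PySem.Dict.empty 0 0 0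
    rw [show ((0 : Int) + 0) = (0 : Int) by ring] at hmain
    rw [pvFirst_spec (pvBuckets lengths) ks [] 0 0 0, List.nil_append]
    exact congrArg (fun d : PySem.Dict (Int × Int) Int =>
      d.items.map (fun q => (q.1.1, q.1.2, q.2))) hmain
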